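-- pv_equiv track=rewrite | github.com/eriosta/storymode | src/storymode/eval.py | pair_lesions
-- ===== SOURCE A (Python) =====
-- from typing import Dict, Any, List, Tuple
--
-- def lesion_match_key(lesion: Dict[str, Any]) -> Tuple:
--     return (
--         lesion.get("finding_type"),
--         (lesion.get("body_site") or "").lower(),
--         (lesion.get("node_station") or "").lower()
--     )
--
-- def pair_lesions(pred: List[Dict[str,Any]], ref: List[Dict[str,Any]]) -> List[Tuple[Dict[str,Any], Dict[str,Any]]]:
--     # Greedy pairing by (finding_type, body_site, node_station)
--     used = set()
--     pairs = []
--     for p in pred: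
--         key = lesion_match_key(p)
--         best = None
--         for i, r in enumerate(ref):
--             if i in used:
--                 continue
--             if lesion_match_key(r) == key:
--                 best = i
--                 break
--         if best is not None:
--             used.add(best)
--             pairs.append((p, ref[best]))
--     return pairs
-- ===== SOURCE B (Python) =====
-- def lesion_match_key(lesion):
--     return (
--         lesion.get("finding_type"),
--         (lesion.get("body_site") or "").lower(),
--         (lesion.get("node_station") or "").lower()
--     )
--
-- def pair_lesions(pred, ref):
--     # Bucket the reference lesions by match key, in order; pop the front per pred.
--     buckets = {}
--     for r in ref:
--         buckets.setdefault(lesion_match_key(r), []).append(r)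
--     pairs = []
--     for p in pred:
--         q = buckets.get(lesion_match_key(p))
--         if q:
--             pairs.append((p, q.pop(0)))
--     return pairs
-- ===== Notes on version B (the rewrite author's own statement) =====
-- stated objective: alternative
-- what changed: Replaces A's per-prediction scan of the reference list with a used-index set by a dict of per-key queues built once over ref, from which each prediction pops the front match.
import Mathlib
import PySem

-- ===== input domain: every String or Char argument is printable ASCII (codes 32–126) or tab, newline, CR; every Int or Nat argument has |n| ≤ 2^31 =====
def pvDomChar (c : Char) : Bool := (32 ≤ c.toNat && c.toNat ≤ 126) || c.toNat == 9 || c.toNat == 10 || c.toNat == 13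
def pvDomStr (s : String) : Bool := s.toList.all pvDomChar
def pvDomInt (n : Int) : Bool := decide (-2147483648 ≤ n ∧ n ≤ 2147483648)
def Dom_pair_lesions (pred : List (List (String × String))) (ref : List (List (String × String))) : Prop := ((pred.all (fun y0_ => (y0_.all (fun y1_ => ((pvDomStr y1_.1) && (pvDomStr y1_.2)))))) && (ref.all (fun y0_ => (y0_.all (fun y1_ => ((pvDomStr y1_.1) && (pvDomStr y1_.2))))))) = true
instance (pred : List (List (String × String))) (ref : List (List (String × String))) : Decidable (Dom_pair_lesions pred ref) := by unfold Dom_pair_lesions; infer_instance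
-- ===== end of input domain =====

-- B buckets the reference lesions by match key once and pops the front of the matching
-- bucket per prediction, instead of A's per-prediction scan of ref with a used-index set.

-- lesion_match_key: shared helper of A and B (same code in both Pythons)
def lmk (lesion : List (String × String)) : Option String × String × String :=
  ((PySem.Dict.mk lesion).get? "finding_type",
   PySem.Str.lower (((PySem.Dict.mk lesion).get? "body_site").getD ""),
   PySem.Str.lower (((PySem.Dict.mk lesion).get? "node_station").getD ""))

-- ===== PORT A =====
-- inner 'for i, r in enumerate(ref)' loop: first unused index whose key matches;
-- returns the scanned element r alongside i (A's 'ref[best]' IS that element r).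
def findBest (key : Option String × String × String) (used : PySem.Set Int) :
    List (Int × List (String × String)) → Option (Int × List (String × String))
  | [] => none
  | (i, r) :: t =>
    if PySem.Set.contains used i then findBest key used t
    else if lmk r = key then some (i, r) else findBest key used t

def pair_lesions (pred : List (List (String × String))) (ref : List (List (String × String))) :
    List ((List (String × String)) × (List (String × String))) :=
  (pred.foldl
    (fun (st : PySem.Set Int × List ((List (String × String)) × (List (String × String)))) p =>
      let key := lmk p
      match findBest key st.1 (PySem.List.enumerate ref 0) with
      | some (i, r) => (PySem.Set.add st.1 i, st.2 ++ [(p, r)])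
      | none => st)
    (PySem.Set.empty, [])).2

-- ===== PORT B =====
def pair_lesions_alt (pred : List (List (String × String))) (ref : List (List (String × String))) :
    List ((List (String × String)) × (List (String × String))) :=
  let buckets := ref.foldl (fun d r => d.modify (lmk r) [] (· ++ [r])) PySem.Dict.empty
  (pred.foldl
    (fun (st : PySem.Dict (Option String × String × String) (List (List (String × String))) ×
               List ((List (String × String)) × (List (String × String)))) p =>
      match st.1.get? (lmk p) with
      | some (r :: rest) => (st.1.insert (lmk p) rest, st.2 ++ [(p, r)])
      | _ => st)
    (buckets, [])).2

-- ===== PRECONDITION & SPEC =====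
def Spec_pair_lesions (pred : List (List (String × String))) (ref : List (List (String × String))) (out : List ((List (String × String)) × (List (String × String)))) : Prop := out = pair_lesions_alt pred ref
instance (pred : List (List (String × String))) (ref : List (List (String × String))) (out : List ((List (String × String)) × (List (String × String)))) : Decidable (Spec_pair_lesions pred ref out) := by unfold Spec_pair_lesions; infer_instance

-- ===== CLAIM (what is proved, stated in full; the proofs are below) =====
def Claim_equal_pair_lesions : Prop := ∀ (pred : List (List (String × String))) (ref : List (List (String × String))), Dom_pair_lesions pred ref → Spec_pair_lesions pred ref (pair_lesions pred ref)

-- ===== LEMMAS AND PROOFS =====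

-- remaining (index, lesion) pairs of key `key` under used-set `used`
def g (used : PySem.Set Int) (key : Option String × String × String)
    (L : List (Int × List (String × String))) : List (Int × List (String × String)) :=
  L.filter (fun x => !PySem.Set.contains used x.1 && decide (lmk x.2 = key))

theorem findBest_eq_head (key : Option String × String × String) (used : PySem.Set Int)
    (L : List (Int × List (String × String))) :
    findBest key used L = (g used key L).head? := by
  induction L with
  | nil => rfl
  | cons x t ih =>
    obtain ⟨i, r⟩ := x
    simp only [findBest, g, List.filter_cons]
    by_cases hc : i ∈ used
    · simp [PySem.Set.contains, hc, ih, g]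
    · by_cases hk : lmk r = key
      · simp [PySem.Set.contains, hc, hk]
      · simp [PySem.Set.contains, hc, hk, ih, g]


theorem g_mem_of_mem {used : PySem.Set Int} {key : Option String × String × String}
    {L x} (h : x ∈ g used key L) :
    x ∈ L ∧ PySem.Set.contains used x.1 = false ∧ lmk x.2 = key := by
  have h1 := List.mem_of_mem_filter h
  have h2 := List.of_mem_filter h
  simp only [Bool.and_eq_true, Bool.not_eq_true', decide_eq_true_eq] at h2
  exact ⟨h1, h2.1, h2.2⟩

theorem fst_inj_of_nodup {L : List (Int × List (String × String))}
    (hn : (L.map Prod.fst).Nodup) {x y : Int × List (String × String)}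
    (hx : x ∈ L) (hy : y ∈ L) (he : x.1 = y.1) : x = y :=
  List.inj_on_of_nodup_map hn hx hy he

theorem nodup_fst_g {used key} {L : List (Int × List (String × String))}
    (hn : (L.map Prod.fst).Nodup) : ((g used key L).map Prod.fst).Nodup := by
  exact List.Nodup.sublist (List.Sublist.map Prod.fst List.filter_sublist) hn

theorem g_append (used : PySem.Set Int) (i : Int) (key)
    (L : List (Int × List (String × String))) :
    g (used ++ [i]) key L = (g used key L).filter (fun x => !decide (x.1 = i)) := by
  simp only [g, List.filter_filter]
  apply List.filter_congr
  intro x _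
  by_cases h1 : x.1 ∈ used <;> by_cases h2 : x.1 = i <;>
    simp [PySem.Set.contains, List.mem_append, h1, h2]

theorem g_pop {used : PySem.Set Int} {key} {L : List (Int × List (String × String))}
    {i r t} (hn : (L.map Prod.fst).Nodup) (h : g used key L = (i, r) :: t) (k' : _) :
    g (PySem.Set.add used i) k' L = if k' = key then t else g used k' L := by
  have hmem : (i, r) ∈ g used key L := by rw [h]; exact List.mem_cons_self
  obtain ⟨hiL, hci, hkr⟩ := g_mem_of_mem hmem
  have hci' : i ∉ used := by simpa [PySem.Set.contains] using hci
  have hadd : PySem.Set.add used i = used ++ [i] := by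
    simp [PySem.Set.add, PySem.Set.contains, hci']
  rw [hadd, g_append]
  by_cases hk : k' = key
  · subst hk
    rw [if_pos rfl, h]
    have hng : ((g used k' L).map Prod.fst).Nodup := nodup_fst_g hn
    rw [h] at hng
    simp only [List.map_cons, List.nodup_cons, List.mem_map] at hng
    have ht : ∀ x ∈ t, x.1 ≠ i := by
      intro x hx hxi
      exact hng.1 ⟨x, hx, hxi⟩
    have hfe : List.filter (fun x => !decide (x.1 = i)) t = t :=
      List.filter_eq_self.2 (fun x hx => by simp [ht x hx])
    simp [hfe]
  · rw [if_neg hk, List.filter_eq_self.2]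
    intro x hx
    obtain ⟨hxL, _, hkx⟩ := g_mem_of_mem hx
    have : x.1 ≠ i := by
      intro hxi
      have := fst_inj_of_nodup hn hxL hiL hxi
      rw [this] at hkx
      exact hk (hkx.symm.trans hkr)
    simp [this]

theorem nodup_fst_enumerate (xs : List (List (String × String))) (s : Int) :
    ((PySem.List.enumerate xs s).map Prod.fst).Nodup := by
  have := PySem.List.pairwise_lt_enumerate xs s
  exact (List.pairwise_map.2 this).imp (fun h => ne_of_lt h)

theorem snd_filter_enumerate (k) (xs : List (List (String × String))) (s : Int) :
    ((PySem.List.enumerate xs s).filter (fun x => decide (lmk x.2 = k))).map Prod.snd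
      = xs.filter (fun r => decide (lmk r = k)) := by
  induction xs generalizing s with
  | nil => rfl
  | cons x t ih =>
    rw [PySem.List.enumerate_cons]
    simp only [List.filter_cons]
    by_cases hk : lmk x = k
    · simp [hk, ih]
    · simp [hk, ih]

theorem g_empty_enumerate (k) (xs : List (List (String × String))) (s : Int) :
    (g [] k (PySem.List.enumerate xs s)).map Prod.snd
      = xs.filter (fun r => decide (lmk r = k)) := by
  have hg : g [] k (PySem.List.enumerate xs s)
      = (PySem.List.enumerate xs s).filter (fun x => decide (lmk x.2 = k)) := by
    simp [g, PySem.Set.contains]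
  rw [hg, snd_filter_enumerate]

theorem getD_buckets (ref : List (List (String × String))) (k) :
    ((ref.foldl (fun d r => d.modify (lmk r) [] (· ++ [r])) PySem.Dict.empty).getD k [])
      = ref.filter (fun r => decide (lmk r = k)) := by
  have hmap : (ref.foldl (fun d r => d.modify (lmk r) [] (· ++ [r])) PySem.Dict.empty)
      = ((ref.map (fun r => (lmk r, r))).foldl
          (fun d p => d.modify p.1 [] (· ++ [p.2])) PySem.Dict.empty) := by
    rw [List.foldl_map]
  rw [hmap, PySem.Dict.getD_foldl_modify_append, List.filter_map, List.map_map]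
  simp only [PySem.Dict.getD_empty, List.nil_append]
  have h1 : ∀ r ∈ ref, ((fun (p : (Option String × String × String) × List (String × String)) =>
      p.1 == k) ∘ (fun r => (lmk r, r))) r = decide (lmk r = k) := by
    intro r _; by_cases h : lmk r = k <;> simp [h]
  rw [List.filter_congr h1]
  have h2 := List.map_congr_left
    (l := ref.filter (fun r => decide (lmk r = k)))
    (f := ((fun (x : (Option String × String × String) × List (String × String)) => x.2)
           ∘ fun r => (lmk r, r))) (g := id) (fun a _ => rfl)
  rw [h2, List.map_id]

theorem get?_of_getD_cons {κ ν : Type} [BEq κ] (d : PySem.Dict κ (List ν)) (k : κ)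
    {x : ν} {xs : List ν} (h : d.getD k [] = x :: xs) : d.get? k = some (x :: xs) := by
  rw [PySem.Dict.getD_eq_get?_getD] at h
  cases hq : d.get? k with
  | none => rw [hq] at h; simp at h
  | some v => rw [hq] at h; simp at h; rw [h]

-- the main loop invariant: A's fold from (used, acc) equals B's fold from (d, acc)
-- whenever d's buckets list exactly the unused refs of each key, in order
theorem loop_eq (ref : List (List (String × String))) (ps : List (List (String × String)))
    (used : PySem.Set Int)
    (d : PySem.Dict (Option String × String × String) (List (List (String × String))))
    (acc : List ((List (String × String)) × (List (String × String))))
    (h : ∀ k, d.getD k [] = (g used k (PySem.List.enumerate ref 0)).map Prod.snd) :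
    (ps.foldl
      (fun (st : PySem.Set Int × List ((List (String × String)) × (List (String × String)))) p =>
        let key := lmk p
        match findBest key st.1 (PySem.List.enumerate ref 0) with
        | some (i, r) => (PySem.Set.add st.1 i, st.2 ++ [(p, r)])
        | none => st) (used, acc)).2
    = (ps.foldl
      (fun (st : PySem.Dict (Option String × String × String) (List (List (String × String))) ×
                 List ((List (String × String)) × (List (String × String)))) p =>
        match st.1.get? (lmk p) with
        | some (r :: rest) => (st.1.insert (lmk p) rest, st.2 ++ [(p, r)])
        | _ => st) (d, acc)).2 := by
  induction ps generalizing used d acc with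
  | nil => rfl
  | cons p ps ih =>
    simp only [List.foldl_cons]
    rw [findBest_eq_head]
    cases hE : g used (lmk p) (PySem.List.enumerate ref 0) with
    | nil =>
      have hD : d.getD (lmk p) [] = [] := by rw [h (lmk p), hE]; rfl
      rw [PySem.Dict.getD_eq_get?_getD] at hD
      cases hq : d.get? (lmk p) with
      | none => exact ih used d acc h
      | some v =>
        rw [hq] at hD; simp at hD; subst hD
        exact ih used d acc h
    | cons x t =>
      obtain ⟨i, r⟩ := x
      have hD : d.getD (lmk p) [] = r :: t.map Prod.snd := by
        rw [h (lmk p), hE]; rfl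
      rw [get?_of_getD_cons d (lmk p) hD]
      simp only [List.head?_cons]
      refine ih (PySem.Set.add used i) (d.insert (lmk p) (t.map Prod.snd)) (acc ++ [(p, r)]) ?_
      intro k
      rw [PySem.Dict.getD_insert,
        g_pop (nodup_fst_enumerate ref 0) hE k]
      by_cases hk : k = lmk p <;> simp [hk, h k]

-- ===== VERDICT (by name: the statement is the Claim_ definition above) =====
theorem pair_lesions_spec : Claim_equal_pair_lesions := by
  intro pred ref _
  unfold Spec_pair_lesions pair_lesions pair_lesions_alt
  exact loop_eq ref pred PySem.Set.empty _ [] (fun k => by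
    rw [getD_buckets]
    exact (g_empty_enumerate k ref 0).symm)
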